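-- pv_equiv track=rewrite | github.com/abUmat/abUmalib | mymath/bigint.py | _itos
-- ===== SOURCE A (Python) =====
-- _bigint_D = 1_000_000_000
--
-- _bigint_logD = 9
--
-- def _itos(x: int, zero_padding: bool) -> str:
--     assert(0 <= x and x < _bigint_D)
--     res: List[int] = []
--     for _ in range(_bigint_logD):
--         x, rem = divmod(x, 10)
--         res.append(rem)
--     if not zero_padding:
--         while res and not res[-1]:
--             res.pop()
--         assert(res)
--     return ''.join(map(str, res[::-1]))
-- ===== SOURCE B (Python) =====
-- _bigint_D = 1_000_000_000
--
-- _bigint_logD = 9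
--
-- def _itos(x: int, zero_padding: bool) -> str:
--     assert 0 <= x < _bigint_D
--     s = str(x).zfill(_bigint_logD)
--     if zero_padding:
--         return s
--     s = s.lstrip('0')
--     assert s
--     return s
-- ===== Notes on version B (the rewrite author's own statement) =====
-- stated objective: idiomatic
-- what changed: Replaces the manual divmod digit-extraction loop, digit-list popping and join with direct string formatting: str(x).zfill(9), and lstrip('0') for the non-padded form.
import Mathlib
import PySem

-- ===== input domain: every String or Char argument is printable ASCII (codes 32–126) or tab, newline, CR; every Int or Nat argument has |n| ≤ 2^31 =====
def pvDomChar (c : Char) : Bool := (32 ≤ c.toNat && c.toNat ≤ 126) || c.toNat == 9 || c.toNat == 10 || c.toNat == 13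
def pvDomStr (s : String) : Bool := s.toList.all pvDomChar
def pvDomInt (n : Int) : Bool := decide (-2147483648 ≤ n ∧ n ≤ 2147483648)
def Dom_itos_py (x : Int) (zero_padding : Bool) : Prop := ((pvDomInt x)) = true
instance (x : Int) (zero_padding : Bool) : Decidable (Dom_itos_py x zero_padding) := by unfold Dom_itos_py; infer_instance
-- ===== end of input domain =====

-- B replaces A's divmod digit loop + list popping by direct string formatting (zfill / lstrip of str(x)); same return value on Pre_.

-- ===== PORT A =====
-- `while res and not res[-1]: res.pop()` — res[-1] of a nonempty list is its last
-- element (getLast?), res.pop() drops it (dropLast); exact step for step.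
def itosPop (res : List Int) : List Int :=
  if h : res.getLast? = some 0 then itosPop res.dropLast else res
termination_by res.length
decreasing_by
  cases res with
  | nil => simp at h
  | cons a t => simp [List.length_dropLast]

def itos_py (x : Int) (zero_padding : Bool) : String :=
  -- assert(0 <= x and x < _bigint_D): raises outside Pre_itos_py, no value computed there
  let st := (PySem.List.pyRange 0 9).foldl
      (fun (s : Int × List Int) _ =>
        (PySem.Int.floordiv s.1 10, s.2 ++ [PySem.Int.mod s.1 10])) (x, [])
  let res := st.2
  let res := if !zero_padding then itosPop res else res  -- assert(res): raises outside Pre_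
  PySem.Str.join "" (((PySem.List.slice? res none none (-1)).getD []).map PySem.Int.toStr)

-- ===== PORT B =====
def itos_py_alt (x : Int) (zero_padding : Bool) : String :=
  -- assert 0 <= x < _bigint_D: raises outside Pre_itos_py
  let s := PySem.Str.zfill (PySem.Int.toStr x) 9
  if zero_padding then s
  else
    -- s.lstrip('0') ported by hand (exact for the single-char strip set '0');
    -- assert s: raises outside Pre_
    String.ofList (s.toList.dropWhile (· == '0'))

-- ===== PRECONDITION & SPEC =====
-- Pre_ excludes exactly the inputs where A raises AssertionError: x outside [0, 10^9),
-- and x = 0 with zero_padding = False (the stripped digit list is empty).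
def Pre_itos_py (x : Int) (zero_padding : Bool) : Prop :=
  0 ≤ x ∧ x < 1000000000 ∧ (zero_padding = true ∨ x ≠ 0)
instance (x : Int) (zero_padding : Bool) : Decidable (Pre_itos_py x zero_padding) := by
  unfold Pre_itos_py; infer_instance
def pvWitness_itos_py : Int × Bool := (5, false)

def Spec_itos_py (x : Int) (zero_padding : Bool) (out : String) : Prop := out = itos_py_alt x zero_padding
instance (x : Int) (zero_padding : Bool) (out : String) : Decidable (Spec_itos_py x zero_padding out) := by unfold Spec_itos_py; infer_instance

-- ===== CLAIM (what is proved, stated in full; the proofs are below) =====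
def Claim_equal_itos_py : Prop := ∀ (x : Int) (zero_padding : Bool), Dom_itos_py x zero_padding → Pre_itos_py x zero_padding → Spec_itos_py x zero_padding (itos_py x zero_padding)

-- ===== LEMMAS AND PROOFS =====

-- least-significant-first digit list extracted by A's loop
def lsbN : Nat → Nat → List Nat
  | 0, _ => []
  | k+1, n => n % 10 :: lsbN k (n / 10)

lemma lsbN_lt (k n : Nat) : ∀ d ∈ lsbN k n, d < 10 := by
  induction k generalizing n with
  | zero => simp [lsbN]
  | succ k ih =>
    intro d hd
    simp only [lsbN, List.mem_cons] at hd
    rcases hd with h | h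
    · subst h; omega
    · exact ih _ _ h

lemma lsbN_succ_right (k n : Nat) : lsbN (k+1) n = lsbN k n ++ [n / 10^k % 10] := by
  induction k generalizing n with
  | zero => simp [lsbN]
  | succ k ih =>
    show n % 10 :: lsbN (k+1) (n/10) = (n % 10 :: lsbN k (n/10)) ++ _
    rw [ih (n/10)]
    simp [Nat.div_div_eq_div_mul, pow_succ, mul_comm]

-- A's loop over range(9), characterised
lemma loopA (k n : Nat) (acc : List Int) :
    (PySem.List.pyRange 0 (k : Int)).foldl
      (fun (s : Int × List Int) _ =>
        (PySem.Int.floordiv s.1 10, s.2 ++ [PySem.Int.mod s.1 10])) ((n : Int), acc)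
    = (((n / 10^k : Nat) : Int), acc ++ (lsbN k n).map (fun d : Nat => (d : Int))) := by
  induction k with
  | zero => simp [lsbN, PySem.List.pyRange]
  | succ k ih =>
    have h : ((k : Int) + 1) = ((k + 1 : Nat) : Int) := by push_cast; ring
    rw [← h, PySem.List.pyRange_one_succ_right (by positivity), List.foldl_append, ih]
    simp only [List.foldl_cons, List.foldl_nil]
    rw [lsbN_succ_right]
    have h1 : PySem.Int.floordiv ((n / 10^k : Nat) : Int) (10:Int) = ((n / 10^k / 10 : Nat) : Int) := by
      exact_mod_cast PySem.Int.floordiv_natCast (n/10^k) 10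
    have h2 : PySem.Int.mod ((n / 10^k : Nat) : Int) (10:Int) = ((n / 10^k % 10 : Nat) : Int) := by
      exact_mod_cast PySem.Int.mod_natCast (n/10^k) 10
    rw [h1, h2, Nat.div_div_eq_div_mul, ← pow_succ]
    simp

-- Nat.toDigits plumbing ------------------------------------------------------

lemma toDigitsCore_acc (f n : Nat) (ds : List Char) :
    Nat.toDigitsCore 10 f n ds = Nat.toDigitsCore 10 f n [] ++ ds := by
  induction f generalizing n ds with
  | zero => simp [Nat.toDigitsCore]
  | succ f ih =>
    simp only [Nat.toDigitsCore]
    by_cases h : n / 10 = 0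
    · simp [h]
    · simp only [h, if_false]
      rw [ih (n/10) ((n % 10).digitChar :: ds), ih (n/10) [(n % 10).digitChar]]
      simp

lemma toDigitsCore_fuel (n : Nat) : ∀ (f₁ f₂ : Nat) (ds : List Char), n < f₁ → n < f₂ →
    Nat.toDigitsCore 10 f₁ n ds = Nat.toDigitsCore 10 f₂ n ds := by
  induction n using Nat.strong_induction_on with
  | _ n ih =>
    intro f₁ f₂ ds h1 h2
    match f₁, f₂ with
    | g₁+1, g₂+1 =>
      simp only [Nat.toDigitsCore]
      by_cases h : n / 10 = 0
      · simp [h]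
      · simp only [h, if_false]
        have hn : 0 < n := by
          rcases Nat.eq_zero_or_pos n with h0 | h0
          · exact absurd (by simp [h0]) h
          · exact h0
        have hlt : n / 10 < n := Nat.div_lt_self hn (by norm_num)
        exact ih (n/10) hlt g₁ g₂ _ (by omega) (by omega)

lemma toDigits_lt10 (n : Nat) (h : n < 10) : Nat.toDigits 10 n = [Nat.digitChar n] := by
  simp [Nat.toDigits, Nat.toDigitsCore, Nat.div_eq_of_lt h, Nat.mod_eq_of_lt h]

lemma toDigits_step (n : Nat) (h : 10 ≤ n) :
    Nat.toDigits 10 n = Nat.toDigits 10 (n/10) ++ [Nat.digitChar (n % 10)] := by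
  have hne : ¬ n / 10 = 0 := by
    have := Nat.div_le_div_right (c := 10) h
    simp at this; omega
  have h0 : Nat.toDigits 10 n = Nat.toDigitsCore 10 n (n/10) [(n % 10).digitChar] := by
    simp only [Nat.toDigits, Nat.toDigitsCore, hne, if_false]
  rw [h0, toDigitsCore_acc,
      toDigitsCore_fuel (n/10) n (n/10+1) [] (Nat.div_lt_self (by omega) (by norm_num)) (Nat.lt_succ_self _)]
  rfl

lemma toDigits_mem (n : Nat) : ∀ c ∈ Nat.toDigits 10 n, ∃ d, d < 10 ∧ c = Nat.digitChar d := by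
  induction n using Nat.strong_induction_on with
  | _ n ih =>
    intro c hc
    by_cases h : n < 10
    · rw [toDigits_lt10 n h] at hc
      simp at hc
      exact ⟨n, h, hc⟩
    · rw [toDigits_step n (by omega)] at hc
      rcases List.mem_append.mp hc with h' | h'
      · exact ih (n/10) (Nat.div_lt_self (by omega) (by norm_num)) c h'
      · exact ⟨n % 10, by omega, by simpa using h'⟩

-- master digit-string lemma: A's padded digit characters are the zero-padded decimal string
lemma lsbN_chars (k : Nat) (hk : 1 ≤ k) : ∀ n : Nat, n < 10^k →
    (lsbN k n).reverse.map Nat.digitChar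
      = List.replicate (k - (Nat.toDigits 10 n).length) '0' ++ Nat.toDigits 10 n := by
  induction k with
  | zero => omega
  | succ k ih =>
    intro n hn
    by_cases hk1 : k = 0
    · subst hk1
      have h10 : n < 10 := by simpa using hn
      simp [lsbN, toDigits_lt10 n h10, Nat.mod_eq_of_lt h10]
    · have hk' : 1 ≤ k := by omega
      have hdiv : n / 10 < 10^k := by
        rw [Nat.div_lt_iff_lt_mul (by norm_num)]
        calc n < 10^(k+1) := hn
        _ = 10^k * 10 := by rw [pow_succ]
      have step : (lsbN (k+1) n).reverse.map Nat.digitChar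
          = ((lsbN k (n/10)).reverse.map Nat.digitChar) ++ [Nat.digitChar (n % 10)] := by
        simp [lsbN]
      rw [step, ih hk' (n/10) hdiv]
      by_cases h10 : n < 10
      · have : n / 10 = 0 := Nat.div_eq_of_lt h10
        have hrep : List.replicate (k - 1) '0' ++ [Nat.digitChar 0] = List.replicate k '0' := by
          have h0 : Nat.digitChar 0 = '0' := by decide
          rw [h0, ← List.replicate_succ' (n := k - 1)]
          congr 1
          omega
        rw [this, toDigits_lt10 0 (by norm_num), toDigits_lt10 n h10, Nat.mod_eq_of_lt h10]
        simp only [List.length_singleton]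
        rw [hrep, Nat.add_sub_cancel]
      · rw [toDigits_step n (by omega)]
        simp only [List.length_append, List.length_singleton]
        have he : k + 1 - ((Nat.toDigits 10 (n/10)).length + 1)
            = k - (Nat.toDigits 10 (n/10)).length := by omega
        rw [he]
        simp [List.append_assoc]

lemma toDigits_ne_nil (n : Nat) : Nat.toDigits 10 n ≠ [] := by
  by_cases h : n < 10
  · rw [toDigits_lt10 n h]; simp
  · rw [toDigits_step n (by omega)]; simp

-- zfill on a digit string (no sign char) is plain left padding
lemma zfill_digits (n : Nat) (h : n < 10^9) :
    PySem.Chars.zfill (Nat.toDigits 10 n) 9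
      = List.replicate (9 - (Nat.toDigits 10 n).length) '0' ++ Nat.toDigits 10 n := by
  have hlen : (Nat.toDigits 10 n).length ≤ 9 :=
    Nat.toDigits_length 10 n 9 (by norm_num) h
  rcases hcs : Nat.toDigits 10 n with _ | ⟨c, rest⟩
  · exact absurd hcs (toDigits_ne_nil n)
  · have hc : ∃ d, d < 10 ∧ c = Nat.digitChar d := toDigits_mem n c (by rw [hcs]; simp)
    have hsign : ¬ (c = '+' ∨ c = '-') := by
      rcases hc with ⟨d, hd, rfl⟩
      interval_cases d <;> decide
    rw [hcs] at hlen
    unfold PySem.Chars.zfill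
    by_cases hle : (9 : Int) ≤ (((c :: rest).length : Nat) : Int)
    · have h9 : (c :: rest).length = 9 := by omega
      rw [if_pos hle, h9]
      simp
    · rw [if_neg hle]
      simp [hsign]

-- digits back to a string: join('', map(str, ·))
lemma join_digits (l : List Nat) (h : ∀ d ∈ l, d < 10) :
    (PySem.Str.join "" ((l.map (fun d : Nat => (d : Int))).map PySem.Int.toStr)).toList
      = l.map Nat.digitChar := by
  rw [PySem.Str.toList_join]
  have hparts : (((l.map (fun d : Nat => (d : Int))).map PySem.Int.toStr).map String.toList)
      = (l.map Nat.digitChar).map (fun c => [c]) := by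
    induction l with
    | nil => simp
    | cons a t ih =>
      have ha10 := h a (by simp)
      have hhd : String.toList (PySem.Int.toStr ((a : Nat) : Int)) = [Nat.digitChar a] := by
        rw [PySem.Int.toList_toStr]
        unfold PySem.Int.toChars
        have hne : ¬ (((a : Nat) : Int) < 0) := by omega
        simp only [hne, if_false, Int.toNat_natCast]
        exact toDigits_lt10 a ha10
      simp only [List.map_cons, hhd, List.cons.injEq, true_and]
      exact ih (fun d hd => h d (by simp [hd]))
  rw [hparts]
  have hsep : ("" : String).toList = [] := by decide
  rw [hsep, PySem.Chars.join_nil_singletons]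

lemma dropWhile_congr' {α : Type} (p q : α → Bool) (l : List α)
    (h : ∀ a ∈ l, p a = q a) : l.dropWhile p = l.dropWhile q := by
  induction l with
  | nil => rfl
  | cons a t ih =>
    simp only [List.dropWhile_cons, h a (by simp)]
    split
    · exact ih (fun a ha => h a (by simp [ha]))
    · rfl

-- A's trailing-zero popping, reversed, is leading-zero dropping
lemma itosPop_rev (l : List Int) :
    (itosPop l).reverse = l.reverse.dropWhile (· == 0) := by
  induction l using List.reverseRecOn with
  | nil => simp [itosPop]
  | append_singleton t a ih =>
    rw [itosPop]
    simp only [List.getLast?_concat, List.dropLast_concat, List.reverse_append,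
      List.reverse_cons, List.reverse_nil, List.nil_append, List.singleton_append]
    by_cases ha : a = 0
    · subst ha
      simp [ih]
    · have hb : (a == 0) = false := by simpa using ha
      simp [ha, hb]

-- slice with step -1 reverses
lemma slice_neg_one (l : List Int) :
    (PySem.List.slice? l none none (-1)).getD [] = l.reverse := by
  simp [pysem]

lemma string_eq_of_toList {s t : String} (h : s.toList = t.toList) : s = t :=
  String.toList_inj.mp h

-- ===== VERDICT (by name: the statement is the Claim_ definition above) =====
set_option maxHeartbeats 1000000 in
theorem itos_py_spec : Claim_equal_itos_py := by
  intro x zp hdom hpre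
  obtain ⟨hx0, hxD, hzp⟩ := hpre
  unfold Spec_itos_py
  lift x to ℕ using hx0 with n hx
  have hnD : n < 10^9 := by norm_num; exact_mod_cast hxD
  unfold itos_py itos_py_alt
  simp only []
  have hloop := loopA 9 n []
  simp only [Nat.cast_ofNat] at hloop
  rw [hloop]
  have htoChars : (PySem.Int.toStr (n : Int)).toList = Nat.toDigits 10 n := by
    rw [PySem.Int.toList_toStr]
    unfold PySem.Int.toChars
    have hneg : ¬ ((n : Int) < 0) := by omega
    simp [hneg]
  have hzfill : (PySem.Str.zfill (PySem.Int.toStr (n : Int)) 9).toList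
      = (lsbN 9 n).reverse.map Nat.digitChar := by
    rw [PySem.Str.toList_zfill, htoChars, zfill_digits n hnD, ← lsbN_chars 9 (by norm_num) n hnD]
  cases zp with
  | true =>
    rw [Bool.not_true, if_neg (by decide : ¬ ((false:Bool) = true)), if_pos rfl, List.nil_append]
    apply string_eq_of_toList
    rw [slice_neg_one, ← List.map_reverse]
    rw [join_digits _ (fun d hd => lsbN_lt 9 n d (List.mem_reverse.mp hd)), hzfill]
  | false =>
    rw [Bool.not_false, if_pos rfl, if_neg (by decide : ¬ ((false:Bool) = true)), List.nil_append]
    apply string_eq_of_toList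
    rw [String.toList_ofList, slice_neg_one, itosPop_rev, ← List.map_reverse]
    rw [List.dropWhile_map]
    rw [join_digits _ (fun d hd => lsbN_lt 9 n d (List.mem_reverse.mp ((List.dropWhile_sublist _).subset hd)))]
    rw [hzfill, List.dropWhile_map]
    refine congrArg (List.map Nat.digitChar) (dropWhile_congr' _ _ _ ?_)
    intro a ha
    have ha10 : a < 10 := lsbN_lt 9 n a (List.mem_reverse.mp ha)
    interval_cases a <;> decide
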